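-- pv_equiv track=rewrite | github.com/youngqqcn/fatopia-site | seats.py | check_seats
-- ===== SOURCE A (Python) =====
-- def check_seats(seats):
--     """检查是否有不连座的"""
--     row_map = {}
--     for row in range(len(seats)):
--         for col in range(len(seats[row])):
--             id = seats[row][col]
--             if id == 'O':
--                 return False
--
--             if id not in row_map:
--                 row_map[id] = set([row])
--                 continue
--             else:
--                 row_map[id].add(row)
--
--             # 如果存在不连座的
--             if len(row_map[id]) > 2:
--                 return False
--     return True
-- ===== SOURCE B (Python) =====
-- def check_seats(seats):
--     """检查是否有不连座的"""
--     if any('O' in row for row in seats):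
--         return False
--     ids = {id for row in seats for id in row}
--     return all(sum(1 for row in seats if id in row) <= 2 for id in ids)
-- ===== Notes on version B (the rewrite author's own statement) =====
-- stated objective: alternative
-- what changed: B maintains no per-cell state at all: instead of A's single scan that grows a dict of id->set-of-rows and aborts inline, B first checks whether any cell is 'O', then for each distinct id independently recounts from scratch how many rows contain it and requires that count to be at most 2.
import Mathlib
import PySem

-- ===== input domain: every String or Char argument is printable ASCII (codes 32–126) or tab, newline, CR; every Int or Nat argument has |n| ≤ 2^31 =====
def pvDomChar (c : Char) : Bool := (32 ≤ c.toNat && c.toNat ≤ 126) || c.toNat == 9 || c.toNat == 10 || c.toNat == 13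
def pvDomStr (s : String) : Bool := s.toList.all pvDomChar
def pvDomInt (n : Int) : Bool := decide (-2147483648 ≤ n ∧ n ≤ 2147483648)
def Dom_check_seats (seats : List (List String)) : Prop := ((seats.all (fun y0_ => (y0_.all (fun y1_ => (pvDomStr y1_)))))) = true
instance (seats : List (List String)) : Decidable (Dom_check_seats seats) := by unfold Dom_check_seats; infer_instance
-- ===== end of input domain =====

-- B keeps no per-cell state: it checks for an 'O' cell, then recounts per distinct id how many
-- rows contain it (count ≤ 2), replacing A's stateful dict-of-row-sets scan; same result, proved for all inputs.

-- ===== PORT A =====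
-- inner loop: for col in range(len(seats[row])): … (early 'return False' = none)
def checkSeatsACells (row : Int) (cells : List String)
    (m : PySem.Dict String (PySem.Set Int)) :
    Option (PySem.Dict String (PySem.Set Int)) :=
  match cells, m with
  | [], m => some m
  | id :: rest, m =>
    if id = "O" then none
    else
      match m.get? id with
      | none => checkSeatsACells row rest (m.insert id (PySem.Set.ofList [row]))  -- continue
      | some s =>
        let s' := PySem.Set.add s row
        let m' := m.insert id s'
        if 2 < PySem.Set.len s' then none else checkSeatsACells row rest m'

-- outer loop: for row in range(len(seats)): …
def checkSeatsARows (row : Int) (rows : List (List String))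
    (m : PySem.Dict String (PySem.Set Int)) :
    Option (PySem.Dict String (PySem.Set Int)) :=
  match rows, m with
  | [], m => some m
  | r :: rest, m =>
    match checkSeatsACells row r m with
    | none => none
    | some m' => checkSeatsARows (row + 1) rest m'

def check_seats (seats : List (List String)) : Bool :=
  (checkSeatsARows 0 seats PySem.Dict.empty).isSome

-- ===== PORT B =====
-- sum(1 for row in seats if id in row)
def pvCountRows (id : String) (seats : List (List String)) : Int :=
  seats.foldl (fun acc row => if row.contains id then acc + 1 else acc) 0

-- if any('O' in row …): return False; ids = {id for row in seats for id in row};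
-- return all(count(id) <= 2 for id in ids)
def check_seats_alt (seats : List (List String)) : Bool :=
  if seats.any (fun row => row.contains "O") then false
  else (PySem.Set.ofList (seats.flatMap (fun row => row))).all
        (fun id => pvCountRows id seats ≤ 2)

-- ===== PRECONDITION & SPEC =====
def Spec_check_seats (seats : List (List String)) (out : Bool) : Prop := out = check_seats_alt seats
instance (seats : List (List String)) (out : Bool) : Decidable (Spec_check_seats seats out) := by unfold Spec_check_seats; infer_instance

-- ===== CLAIM (what is proved, stated in full; the proofs are below) =====
def Claim_equal_check_seats : Prop := ∀ (seats : List (List String)), Dom_check_seats seats → Spec_check_seats seats (check_seats seats)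

-- ===== LEMMAS AND PROOFS =====

-- Reference accumulator (proof device only): the plain dict-of-row-sets accumulation without
-- A's inline length abort; A is related to it, and it is related to B's recount.
def pvAccCells (r : Int) (cells : List String)
    (m : PySem.Dict String (PySem.Set Int)) :
    Option (PySem.Dict String (PySem.Set Int)) :=
  match cells, m with
  | [], m => some m
  | id :: rest, m =>
    if id = "O" then none
    else pvAccCells r rest
      (m.insert id (PySem.Set.add (m.getD id PySem.Set.empty) r))

def pvAccRows (r : Int) (rows : List (List String))
    (m : PySem.Dict String (PySem.Set Int)) :
    Option (PySem.Dict String (PySem.Set Int)) :=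
  match rows, m with
  | [], m => some m
  | row :: rest, m =>
    match pvAccCells r row m with
    | none => none
    | some m' => pvAccRows (r + 1) rest m'

-- "every recorded row-set is small" (stated via get?)
def pvSmall (m : PySem.Dict String (PySem.Set Int)) : Prop :=
  ∀ k s, m.get? k = some s → PySem.Set.len s ≤ 2

theorem pv_len_add_ge (s : PySem.Set Int) (x : Int) :
    PySem.Set.len s ≤ PySem.Set.len (PySem.Set.add s x) := by
  simp only [PySem.Set.add, PySem.Set.len]
  split_ifs <;> simp

theorem pv_small_insert (m : PySem.Dict String (PySem.Set Int)) (k : String)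
    (v : PySem.Set Int) (hm : pvSmall m) (hv : PySem.Set.len v ≤ 2) :
    pvSmall (m.insert k v) := by
  intro k' s hks
  rcases eq_or_ne k' k with h | h
  · subst h; rw [PySem.Dict.get?_insert_self] at hks; cases hks; exact hv
  · rw [PySem.Dict.get?_insert_of_ne _ _ h] at hks; exact hm _ _ hks

-- one accumulation step on key id keeps a map bad
theorem pv_bad_step (m : PySem.Dict String (PySem.Set Int)) (id : String) (r : Int)
    (hbad : ¬ pvSmall m) :
    ¬ pvSmall (m.insert id (PySem.Set.add (m.getD id PySem.Set.empty) r)) := by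
  intro hs; apply hbad
  intro k s hks
  rcases eq_or_ne k id with h | h
  · subst h
    have h2 := hs k (PySem.Set.add (m.getD k PySem.Set.empty) r)
      (PySem.Dict.get?_insert_self m k _)
    have h3 : m.getD k PySem.Set.empty = s := by
      rw [PySem.Dict.getD_eq_get?_getD, hks]; rfl
    have h4 := pv_len_add_ge (m.getD k PySem.Set.empty) r
    rw [h3] at h2 h4
    omega
  · exact hs k s (by rw [PySem.Dict.get?_insert_of_ne _ _ h]; exact hks)

-- a bad map stays bad through the accumulation
theorem pv_bad_Bcells (r : Int) (cells : List String)
    (m : PySem.Dict String (PySem.Set Int)) (hbad : ¬ pvSmall m) :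
    pvAccCells r cells m = none ∨
      ∃ m', pvAccCells r cells m = some m' ∧ ¬ pvSmall m' := by
  induction cells generalizing m with
  | nil => exact Or.inr ⟨m, rfl, hbad⟩
  | cons id rest ih =>
    by_cases hO : id = "O"
    · left; simp only [pvAccCells, if_pos hO]
    · rw [show pvAccCells r (id :: rest) m
          = pvAccCells r rest
              (m.insert id (PySem.Set.add (m.getD id PySem.Set.empty) r)) from by
        simp only [pvAccCells, if_neg hO]]
      exact ih _ (pv_bad_step m id r hbad)

theorem pv_bad_Brows (r : Int) (rows : List (List String))
    (m : PySem.Dict String (PySem.Set Int)) (hbad : ¬ pvSmall m) :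
    pvAccRows r rows m = none ∨
      ∃ m', pvAccRows r rows m = some m' ∧ ¬ pvSmall m' := by
  induction rows generalizing r m with
  | nil => exact Or.inr ⟨m, rfl, hbad⟩
  | cons row rest ih =>
    rcases pv_bad_Bcells r row m hbad with h | ⟨m', hm', hbad'⟩
    · left; simp only [pvAccRows, h]
    · have := ih (r + 1) m' hbad'
      simpa only [pvAccRows, hm'] using this

-- core cell-level correspondence between A and the accumulator
theorem pv_cells (row : Int) (cells : List String)
    (m : PySem.Dict String (PySem.Set Int)) (hm : pvSmall m) :
    (pvAccCells row cells m = none ∧ checkSeatsACells row cells m = none) ∨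
      ∃ m', pvAccCells row cells m = some m' ∧
        ((pvSmall m' ∧ checkSeatsACells row cells m = some m') ∨
         (¬ pvSmall m' ∧ checkSeatsACells row cells m = none)) := by
  induction cells generalizing m with
  | nil => exact Or.inr ⟨m, rfl, Or.inl ⟨hm, rfl⟩⟩
  | cons id rest ih =>
    by_cases hO : id = "O"
    · left
      constructor <;> simp only [pvAccCells, checkSeatsACells, if_pos hO]
    · have hBstep : pvAccCells row (id :: rest) m
          = pvAccCells row rest
              (m.insert id (PySem.Set.add (m.getD id PySem.Set.empty) row)) := by
        simp only [pvAccCells, if_neg hO]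
      cases hget : m.get? id with
      | none =>
        have hv : PySem.Set.add (m.getD id PySem.Set.empty) row
            = PySem.Set.ofList [row] := by
          rw [PySem.Dict.getD_eq_get?_getD, hget]; rfl
        have hAstep : checkSeatsACells row (id :: rest) m
            = checkSeatsACells row rest (m.insert id (PySem.Set.ofList [row])) := by
          simp only [checkSeatsACells, if_neg hO, hget]
        have hsmall : pvSmall (m.insert id (PySem.Set.ofList [row])) :=
          pv_small_insert m id _ hm
            (by simp [PySem.Set.ofList, PySem.Set.add, PySem.Set.len, PySem.Set.contains])
        rw [hBstep, hv, hAstep]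
        exact ih _ hsmall
      | some s =>
        have hv : PySem.Set.add (m.getD id PySem.Set.empty) row
            = PySem.Set.add s row := by
          rw [PySem.Dict.getD_eq_get?_getD, hget]
          rfl
        have hAstep : checkSeatsACells row (id :: rest) m
            = if 2 < PySem.Set.len (PySem.Set.add s row) then none
              else checkSeatsACells row rest (m.insert id (PySem.Set.add s row)) := by
          simp only [checkSeatsACells, if_neg hO, hget]
        rw [hBstep, hv, hAstep]
        by_cases hlen : 2 < PySem.Set.len (PySem.Set.add s row)
        · rw [if_pos hlen]
          have hbad : ¬ pvSmall (m.insert id (PySem.Set.add s row)) := by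
            intro hsm
            have := hsm id (PySem.Set.add s row) (PySem.Dict.get?_insert_self m id _)
            omega
          rcases pv_bad_Bcells row rest _ hbad with h | ⟨m', hb, hbad'⟩
          · exact Or.inl ⟨h, rfl⟩
          · exact Or.inr ⟨m', hb, Or.inr ⟨hbad', rfl⟩⟩
        · rw [if_neg hlen]
          exact ih _ (pv_small_insert m id _ hm (by omega))

-- row-level correspondence between A and the accumulator
theorem pv_rows (r : Int) (rows : List (List String))
    (m : PySem.Dict String (PySem.Set Int)) (hm : pvSmall m) :
    (pvAccRows r rows m = none ∧ checkSeatsARows r rows m = none) ∨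
      ∃ m', pvAccRows r rows m = some m' ∧
        ((pvSmall m' ∧ checkSeatsARows r rows m = some m') ∨
         (¬ pvSmall m' ∧ checkSeatsARows r rows m = none)) := by
  induction rows generalizing r m with
  | nil => exact Or.inr ⟨m, rfl, Or.inl ⟨hm, rfl⟩⟩
  | cons row rest ih =>
    rcases pv_cells r row m hm with ⟨hb, ha⟩ | ⟨m1, hb, hrest⟩
    · left; constructor
      · simp only [pvAccRows, hb]
      · simp only [checkSeatsARows, ha]
    · rcases hrest with ⟨h1, h2⟩ | ⟨h1, h2⟩
      · rcases ih (r + 1) m1 h1 with ⟨hb', ha'⟩ | ⟨m', hb', hrest'⟩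
        · left; constructor
          · simp only [pvAccRows, hb, hb']
          · simp only [checkSeatsARows, h2, ha']
        · refine Or.inr ⟨m', by simp only [pvAccRows, hb, hb'], ?_⟩
          simpa only [checkSeatsARows, h2] using hrest'
      · rcases pv_bad_Brows (r + 1) rest m1 h1 with h | ⟨m', hb', hbad'⟩
        · left; constructor
          · simp only [pvAccRows, hb, h]
          · simp only [checkSeatsARows, h2]
        · refine Or.inr ⟨m', by simp only [pvAccRows, hb, hb'], Or.inr ⟨hbad', ?_⟩⟩
          simp only [checkSeatsARows, h2]

-- ===== the accumulator vs B's recount =====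

-- if a row contains 'O' the accumulation aborts
theorem pv_acc_cells_O (r : Int) (cells : List String)
    (m : PySem.Dict String (PySem.Set Int)) (h : "O" ∈ cells) :
    pvAccCells r cells m = none := by
  induction cells generalizing m with
  | nil => simp at h
  | cons id rest ih =>
    by_cases hO : id = "O"
    · simp only [pvAccCells, if_pos hO]
    · have hmem : "O" ∈ rest := by
        rcases List.mem_cons.mp h with h' | h'
        · exact absurd h'.symm hO
        · exact h'
      simp only [pvAccCells, if_neg hO]
      exact ih _ hmem

theorem pv_acc_rows_O (r : Int) (rows : List (List String))
    (m : PySem.Dict String (PySem.Set Int))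
    (h : ∃ row ∈ rows, "O" ∈ row) :
    pvAccRows r rows m = none := by
  induction rows generalizing r m with
  | nil => simp at h
  | cons row rest ih =>
    by_cases hO : "O" ∈ row
    · simp only [pvAccRows, pv_acc_cells_O r row m hO]
    · obtain ⟨row', hrow', hO'⟩ := h
      have : row' ∈ rest := by
        rcases List.mem_cons.mp hrow' with h' | h'
        · exact absurd (h' ▸ hO') hO
        · exact h'
      cases hc : pvAccCells r row m with
      | none => simp only [pvAccRows, hc]
      | some m1 => simp only [pvAccRows, hc]; exact ih (r + 1) m1 ⟨row', this, hO'⟩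

-- cell-level characterisation of the accumulator when no 'O' occurs
theorem pv_acc_cells_char (r : Int) (cells : List String)
    (m : PySem.Dict String (PySem.Set Int)) (h : "O" ∉ cells) :
    ∃ m', pvAccCells r cells m = some m' ∧
      ∀ id, m'.get? id
        = if id ∈ cells then some (PySem.Set.add (m.getD id PySem.Set.empty) r)
          else m.get? id := by
  induction cells generalizing m with
  | nil => exact ⟨m, rfl, by simp⟩
  | cons id0 rest ih =>
    have hO : id0 ≠ "O" := fun he => h (he ▸ List.mem_cons_self)
    have hrest : "O" ∉ rest := fun hm' => h (List.mem_cons_of_mem _ hm')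
    set m1 := m.insert id0 (PySem.Set.add (m.getD id0 PySem.Set.empty) r) with hm1
    obtain ⟨m', hsome, hchar⟩ := ih (m := m1) hrest
    refine ⟨m', ?_, ?_⟩
    · simp only [pvAccCells, if_neg hO]; exact hsome
    · intro id
      rw [hchar id]
      by_cases hin : id ∈ rest
      · rw [if_pos hin, if_pos (List.mem_cons_of_mem _ hin)]
        congr 1
        rcases eq_or_ne id id0 with he | hne
        · subst he
          rw [hm1, PySem.Dict.getD_insert_self]
          -- add is idempotent
          have : r ∈ PySem.Set.add (m.getD id PySem.Set.empty) r := by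
            rw [PySem.Set.mem_add]; exact Or.inr rfl
          rw [PySem.Set.add_of_mem this]
        · rw [hm1, PySem.Dict.getD_insert_of_ne _ _ _ hne]
      · rw [if_neg hin]
        rcases eq_or_ne id id0 with he | hne
        · subst he
          rw [if_pos List.mem_cons_self, hm1, PySem.Dict.get?_insert_self]
        · rw [if_neg (by simp [List.mem_cons, hne, hin]), hm1,
            PySem.Dict.get?_insert_of_ne _ _ hne]

-- row count of id over a list of rows, as an Int
def pvCnt (id : String) (rows : List (List String)) : Int :=
  ((rows.countP (fun row => row.contains id)) : Int)

theorem pv_cnt_cons (id : String) (row : List String) (rest : List (List String)) :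
    pvCnt id (row :: rest) = (if id ∈ row then 1 else 0) + pvCnt id rest := by
  simp only [pvCnt, List.countP_cons]
  by_cases hin : id ∈ row
  · rw [if_pos hin, if_pos (by simpa using hin)]; push_cast; ring
  · rw [if_neg hin, if_neg (by simpa using hin)]; push_cast; ring

theorem pv_cnt_pos (id : String) (rows : List (List String))
    (h : ∃ row ∈ rows, id ∈ row) : 1 ≤ pvCnt id rows := by
  have : 0 < rows.countP (fun row => row.contains id) := by
    rw [List.countP_pos_iff]
    obtain ⟨row, hr, hid⟩ := h
    exact ⟨row, hr, by simpa using hid⟩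
  simp only [pvCnt]
  omega

-- pvCountRows is pvCnt
theorem pv_countRows_eq (id : String) (seats : List (List String)) :
    pvCountRows id seats = pvCnt id seats := by
  have key : ∀ (rows : List (List String)) (acc : Int),
      rows.foldl (fun acc row => if row.contains id then acc + 1 else acc) acc
        = acc + pvCnt id rows := by
    intro rows
    induction rows with
    | nil => intro acc; simp [pvCnt]
    | cons row rest ih =>
      intro acc
      by_cases hin : id ∈ row
      · rw [List.foldl_cons, if_pos (by simpa using hin), ih, pv_cnt_cons, if_pos hin]; ring
      · rw [List.foldl_cons, if_neg (by simpa using hin), ih, pv_cnt_cons, if_neg hin]; ring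
  simpa [pvCountRows] using key seats 0

-- row-level characterisation: the lengths of the recorded sets are exactly the row counts
theorem pv_acc_rows_char (rows : List (List String)) (r : Int)
    (m : PySem.Dict String (PySem.Set Int)) (f : String → Int)
    (hO : ∀ row ∈ rows, "O" ∉ row)
    (h1 : ∀ id, m.get? id = none → f id = 0)
    (h2 : ∀ id s, m.get? id = some s → PySem.Set.len s = f id ∧ ∀ x ∈ s, x < r) :
    ∃ m', pvAccRows r rows m = some m' ∧
      (∀ id, m'.get? id = none → f id + pvCnt id rows = 0) ∧
      (∀ id s, m'.get? id = some s → PySem.Set.len s = f id + pvCnt id rows) := by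
  induction rows generalizing r m f with
  | nil =>
    refine ⟨m, rfl, ?_, ?_⟩
    · intro id h; simp [pvCnt, h1 id h]
    · intro id s h; simpa [pvCnt] using (h2 id s h).1
  | cons row rest ih =>
    obtain ⟨m1, hc, hchar⟩ := pv_acc_cells_char r row m (hO row List.mem_cons_self)
    set f' : String → Int := fun id => f id + (if id ∈ row then 1 else 0) with hf'
    have h1' : ∀ id, m1.get? id = none → f' id = 0 := by
      intro id hnone
      rw [hchar id] at hnone
      by_cases hin : id ∈ row
      · rw [if_pos hin] at hnone; cases hnone
      · rw [if_neg hin] at hnone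
        simp [hf', hin, h1 id hnone]
    have h2' : ∀ id s, m1.get? id = some s →
        PySem.Set.len s = f' id ∧ ∀ x ∈ s, x < r + 1 := by
      intro id s hsome
      rw [hchar id] at hsome
      by_cases hin : id ∈ row
      · rw [if_pos hin] at hsome
        cases hsome
        cases hget : m.get? id with
        | none =>
          have hgd : m.getD id PySem.Set.empty = PySem.Set.empty := by
            rw [PySem.Dict.getD_eq_get?_getD, hget]; rfl
          constructor
          · rw [hgd]
            simp [PySem.Set.add, PySem.Set.len, PySem.Set.empty, PySem.Set.contains,
              hf', hin, h1 id hget]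
          · intro x hx
            rw [hgd] at hx
            have : x = r := by
              simpa [PySem.Set.add, PySem.Set.empty, PySem.Set.contains] using hx
            omega
        | some s0 =>
          have hgd : m.getD id PySem.Set.empty = s0 := by
            rw [PySem.Dict.getD_eq_get?_getD, hget]; rfl
          obtain ⟨hlen0, hlt0⟩ := h2 id s0 hget
          have hrnot : r ∉ s0 := fun hr => absurd (hlt0 r hr) (by omega)
          rw [hgd]
          rw [PySem.Set.add_of_not_mem hrnot]
          constructor
          · have hlen1 : PySem.Set.len (s0 ++ [r]) = PySem.Set.len s0 + 1 := by
              simp [PySem.Set.len]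
            rw [hlen1, hlen0, hf']
            simp [hin]
          · intro x hx
            rcases List.mem_append.mp hx with hx | hx
            · exact lt_trans (hlt0 x hx) (by omega)
            · simp at hx; omega
      · rw [if_neg hin] at hsome
        obtain ⟨hlen0, hlt0⟩ := h2 id s hsome
        have hfid : f' id = f id := by simp [hf', hin]
        exact ⟨by rw [hfid]; exact hlen0, fun x hx => lt_trans (hlt0 x hx) (by omega)⟩
    obtain ⟨m', hrec, hn, hs⟩ := ih (r + 1) m1 f'
      (fun row' hr' => hO row' (List.mem_cons_of_mem _ hr')) h1' h2'
    refine ⟨m', by simp only [pvAccRows, hc]; exact hrec, ?_, ?_⟩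
    · intro id h
      have h0 := hn id h
      have hfid : f' id = f id + (if id ∈ row then 1 else 0) := by rw [hf']
      rw [pv_cnt_cons]
      by_cases hin : id ∈ row
      · rw [if_pos hin] at hfid ⊢; omega
      · rw [if_neg hin] at hfid ⊢; omega
    · intro id s h
      have h0 := hs id s h
      have hfid : f' id = f id + (if id ∈ row then 1 else 0) := by rw [hf']
      rw [pv_cnt_cons]
      by_cases hin : id ∈ row
      · rw [if_pos hin] at hfid ⊢; omega
      · rw [if_neg hin] at hfid ⊢; omega

-- ===== VERDICT (by name: the statement is the Claim_ definition above) =====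
theorem check_seats_spec : Claim_equal_check_seats := by
  intro seats _
  unfold Spec_check_seats check_seats check_seats_alt
  by_cases hO : seats.any (fun row => row.contains "O")
  · -- some row contains 'O': both sides are false
    rw [if_pos hO]
    have hex : ∃ row ∈ seats, "O" ∈ row := by
      obtain ⟨row, hr, hc⟩ := List.any_eq_true.mp hO
      exact ⟨row, hr, by simpa using hc⟩
    have hacc : pvAccRows 0 seats PySem.Dict.empty = none := pv_acc_rows_O 0 seats _ hex
    have hempty : pvSmall (PySem.Dict.empty : PySem.Dict String (PySem.Set Int)) := by
      intro k s h; simp [PySem.Dict.get?_empty] at h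
    rcases pv_rows 0 seats PySem.Dict.empty hempty with ⟨hb, ha⟩ | ⟨m', hb, _⟩
    · simp [ha]
    · rw [hacc] at hb; cases hb
  · -- no 'O' anywhere
    rw [if_neg hO]
    have hnoO : ∀ row ∈ seats, "O" ∉ row := by
      intro row hr hc
      exact hO (List.any_eq_true.mpr ⟨row, hr, by simpa using hc⟩)
    have hempty : pvSmall (PySem.Dict.empty : PySem.Dict String (PySem.Set Int)) := by
      intro k s h; simp [PySem.Dict.get?_empty] at h
    obtain ⟨mf, hmf, hn, hs⟩ := pv_acc_rows_char seats 0 PySem.Dict.empty (fun _ => 0)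
      hnoO (fun _ _ => rfl) (fun id s h => by simp [PySem.Dict.get?_empty] at h)
    -- pvSmall mf ↔ B's all-test (via the recorded lengths = row counts)
    have hiff : pvSmall mf ↔
        ((PySem.Set.ofList (seats.flatMap (fun row => row))).all
          (fun id => pvCountRows id seats ≤ 2) = true) := by
      constructor
      · intro hsm
        rw [List.all_eq_true]
        intro id hid
        have hidmem : id ∈ seats.flatMap (fun row => row) := (PySem.Set.mem_ofList _ _).mp hid
        obtain ⟨row, hr, hin⟩ := List.mem_flatMap.mp hidmem
        have hpos : 1 ≤ pvCnt id seats := pv_cnt_pos id seats ⟨row, hr, hin⟩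
        cases hget : mf.get? id with
        | none => have := hn id hget; omega
        | some s =>
          have hlen := hs id s hget
          have := hsm id s hget
          simp only [decide_eq_true_eq]
          rw [pv_countRows_eq]
          omega
      · intro hall id s hget
        have hlen := hs id s hget
        by_cases hid : id ∈ seats.flatMap (fun row => row)
        · have := List.all_eq_true.mp hall id ((PySem.Set.mem_ofList _ _).mpr hid)
          simp only [decide_eq_true_eq] at this
          rw [pv_countRows_eq] at this
          omega
        · have hz : pvCnt id seats = 0 := by
            have hc0 : seats.countP (fun row => row.contains id) = 0 := by
              by_contra hne
              obtain ⟨row, hr, hc⟩ := List.countP_pos_iff.mp (Nat.pos_of_ne_zero hne)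
              exact hid (List.mem_flatMap.mpr ⟨row, hr, by simpa using hc⟩)
            simp only [pvCnt, hc0, Nat.cast_zero]
          omega
    rcases pv_rows 0 seats PySem.Dict.empty hempty with ⟨hb, _⟩ | ⟨m', hb, hrest⟩
    · rw [hmf] at hb; cases hb
    · rw [hmf] at hb
      cases hb
      rcases hrest with ⟨h1, h2⟩ | ⟨h1, h2⟩
      · rw [h2]
        simp only [Option.isSome_some]
        exact (hiff.mp h1).symm
      · rw [h2]
        simp only [Option.isSome_none]
        symm
        rw [Bool.eq_false_iff]
        intro hc
        exact h1 (hiff.mpr hc)
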